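-- pv_equiv track=rewrite | github.com/J-H-C-037/Subject-EDA | EDA/finals/Divide&Conquer.py | findLowestEvenOdd
-- ===== SOURCE A (Python) =====
-- def findLowestEvenOdd(A):
--     if A == None or len(A) == 0:
--         return None, None
--
--     if len(A) == 1:
--         if A[0] % 2 == 0:
--             return A[0], None
--         else:
--             return None, A[0]
--
--     m = len(A) // 2
--     part1 = A[0:m]
--     part2 = A[m:]
--
--     even1, odd1 = findLowestEvenOdd(part1)
--     even2, odd2 = findLowestEvenOdd(part2)
--
--     if even1 != None and even2 != None:
--         even = min(even1, even2)
--     elif even1 != None: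
--         even = even1
--     else:
--         even = even2
--
--     if odd1 != None and odd2 != None:
--         odd = min(odd1, odd2)
--     elif odd1 != None:
--         odd = odd1
--     else:
--         odd = odd2
--
--     return even, odd
-- ===== SOURCE B (Python) =====
-- def findLowestEvenOdd(A):
--     if A is None or len(A) == 0:
--         return None, None
--     lowest_even = None
--     lowest_odd = None
--     for x in A:
--         if x % 2 == 0:
--             if lowest_even is None or x < lowest_even:
--                 lowest_even = x
--         else:
--             if lowest_odd is None or x < lowest_odd:
--                 lowest_odd = x
--     return lowest_even, lowest_odd
-- ===== Notes on version B (the rewrite author's own statement) =====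
-- stated objective: faster
-- what changed: Replaces the divide-and-conquer recursion (split via slicing, recurse on halves, merge optional minima) with a single iterative pass keeping two None-guarded running minima.
import Mathlib
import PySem

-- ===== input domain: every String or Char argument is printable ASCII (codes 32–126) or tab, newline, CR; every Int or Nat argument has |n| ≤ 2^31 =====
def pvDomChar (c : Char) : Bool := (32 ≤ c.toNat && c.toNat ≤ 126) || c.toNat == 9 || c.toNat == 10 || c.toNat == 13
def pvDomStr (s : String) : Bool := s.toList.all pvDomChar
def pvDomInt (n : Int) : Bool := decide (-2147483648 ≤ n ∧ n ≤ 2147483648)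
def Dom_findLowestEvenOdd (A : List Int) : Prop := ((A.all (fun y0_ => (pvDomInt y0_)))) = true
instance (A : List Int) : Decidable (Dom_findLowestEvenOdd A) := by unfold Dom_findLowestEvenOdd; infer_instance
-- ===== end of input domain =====

-- B replaces A's divide-and-conquer with a single left-to-right pass keeping two running minima (simpler).


-- ===== PORT A =====
-- literal port of the divide-and-conquer: A[0:m] = take m, A[m:] = drop m (m = len//2, always in range)
def findLowestEvenOdd (A : List Int) : Option Int × Option Int :=
  match A with
  | [] => (none, none)
  | [a] => if a % 2 = 0 then (some a, none) else (none, some a)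
  | x :: y :: rest =>
    let L := x :: y :: rest
    let m := L.length / 2
    let part1 := L.take m
    let part2 := L.drop m
    let r1 := findLowestEvenOdd part1
    let r2 := findLowestEvenOdd part2
    let even := match r1.1, r2.1 with
      | some e1, some e2 => some (min e1 e2)
      | some e1, none => some e1
      | none, e2 => e2
    let odd := match r1.2, r2.2 with
      | some o1, some o2 => some (min o1 o2)
      | some o1, none => some o1
      | none, o2 => o2
    (even, odd)
termination_by A.length
decreasing_by
  · simp [List.length_take]; omega
  · simp; omega

-- ===== PORT B =====
def pvStep (st : Option Int × Option Int) (x : Int) : Option Int × Option Int :=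
  if x % 2 = 0 then
    (match st.1 with
     | none => some x
     | some e => if x < e then some x else some e, st.2)
  else
    (st.1, match st.2 with
     | none => some x
     | some o => if x < o then some x else some o)

def findLowestEvenOdd_alt (A : List Int) : Option Int × Option Int :=
  A.foldl pvStep (none, none)

-- ===== PRECONDITION & SPEC =====
def Spec_findLowestEvenOdd (A : List Int) (out : Option Int × Option Int) : Prop := out = findLowestEvenOdd_alt A
instance (A : List Int) (out : Option Int × Option Int) : Decidable (Spec_findLowestEvenOdd A out) := by unfold Spec_findLowestEvenOdd; infer_instance

-- ===== CLAIM (what is proved, stated in full; the proofs are below) =====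
def Claim_equal_findLowestEvenOdd : Prop := ∀ (A : List Int), Dom_findLowestEvenOdd A → Spec_findLowestEvenOdd A (findLowestEvenOdd A)

-- ===== LEMMAS AND PROOFS =====

-- merging of two optional minima, exactly A's combination rule
def pvMergeO (a b : Option Int) : Option Int :=
  match a, b with
  | some e1, some e2 => some (min e1 e2)
  | some e1, none => some e1
  | none, e2 => e2

def pvMerge (p q : Option Int × Option Int) : Option Int × Option Int :=
  (pvMergeO p.1 q.1, pvMergeO p.2 q.2)

theorem pvMergeO_assoc (a b c : Option Int) :
    pvMergeO (pvMergeO a b) c = pvMergeO a (pvMergeO b c) := by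
  cases a <;> cases b <;> cases c <;> simp [pvMergeO, min_assoc]

theorem pvStep_merge (st : Option Int × Option Int) (x : Int) :
    pvStep st x = pvMerge st (pvStep (none, none) x) := by
  obtain ⟨e, o⟩ := st
  by_cases hx : x % 2 = 0 <;> cases e <;> cases o <;>
    simp [pvStep, pvMerge, pvMergeO, hx] <;> split_ifs <;> simp [min_def] <;> omega

theorem foldl_merge (ys : List Int) (st : Option Int × Option Int) :
    ys.foldl pvStep st = pvMerge st (ys.foldl pvStep (none, none)) := by
  induction ys generalizing st with
  | nil => obtain ⟨e, o⟩ := st; cases e <;> cases o <;> simp [pvMerge, pvMergeO]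
  | cons x ys ih =>
    simp only [List.foldl_cons]
    rw [ih (pvStep st x), ih (pvStep (none, none) x), pvStep_merge st x]
    obtain ⟨e1, o1⟩ := st
    obtain ⟨e2, o2⟩ := pvStep (none, none) x
    obtain ⟨e3, o3⟩ := ys.foldl pvStep (none, none)
    simp [pvMerge, pvMergeO_assoc]

theorem alt_append (xs ys : List Int) :
    findLowestEvenOdd_alt (xs ++ ys) =
      pvMerge (findLowestEvenOdd_alt xs) (findLowestEvenOdd_alt ys) := by
  simp only [findLowestEvenOdd_alt, List.foldl_append]
  exact foldl_merge ys _

theorem a_eq_alt (A : List Int) : findLowestEvenOdd A = findLowestEvenOdd_alt A := by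
  induction hn : A.length using Nat.strong_induction_on generalizing A with
  | _ n ih =>
    match A with
    | [] => simp [findLowestEvenOdd, findLowestEvenOdd_alt]
    | [a] =>
      by_cases h : a % 2 = 0 <;>
        simp [findLowestEvenOdd, findLowestEvenOdd_alt, pvStep, h]
    | x :: y :: rest =>
      rw [findLowestEvenOdd]
      have hlen : (x :: y :: rest).length = n := hn
      set L := x :: y :: rest with hL
      have hge : 2 ≤ L.length := by simp [hL]
      have hm1 : (L.take (L.length / 2)).length < n := by
        rw [List.length_take]; omega
      have hm2 : (L.drop (L.length / 2)).length < n := by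
        rw [List.length_drop]; omega
      rw [ih _ hm1 _ rfl, ih _ hm2 _ rfl]
      have hsplit := alt_append (L.take (L.length / 2)) (L.drop (L.length / 2))
      rw [List.take_append_drop] at hsplit
      rw [hsplit]
      rfl

-- ===== VERDICT (by name: the statement is the Claim_ definition above) =====
theorem findLowestEvenOdd_spec : Claim_equal_findLowestEvenOdd := by
  intro A _
  exact a_eq_alt A
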